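-- pv_equiv track=rewrite | github.com/pietro1991-dot/teklab_ai | scripts/convert_transcripts_to_markdown.py | detect_sections
-- ===== SOURCE A (Python) =====
-- def detect_sections(content: str):
--     """
--     Identifica automaticamente le sezioni tematiche nel transcript.
--     Restituisce lista di (titolo_sezione, contenuto_sezione).
--     """
--     sections = []
--
--     # Split per paragrafi
--     paragraphs = [p.strip() for p in content.split('\n\n') if p.strip()]
--
--     current_section = "Introduction"
--     current_content = []
--
--     for para in paragraphs:
--         para_lower = para.lower()
--
--         # Identifica cambio di sezione basato su keywords
--         new_section = None
--
--         if any(keyword in para_lower for keyword in ['we are going to work', 'let\'s understand', 'the structure of']):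
--             new_section = "Practice Structure"
--         elif any(keyword in para_lower for keyword in ['the code of the day', 'code of today']):
--             new_section = "Daily Code"
--         elif any(keyword in para_lower for keyword in ['mantra', 'statement', 'vibration of the day']):
--             new_section = "Daily Practice Elements"
--         elif any(keyword in para_lower for keyword in ['meditation', 'close my eyes', 'breathe', 'visualize']):
--             new_section = "Guided Meditation"
--         elif any(keyword in para_lower for keyword in ['chakra', 'portal', 'crown', 'root']):
--             if new_section != "Guided Meditation":
--                 new_section = "Energy Work"
--         elif any(keyword in para_lower for keyword in ['question', 'q&a', 'ask']):
--             new_section = "Q&A"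
--
--         # Se cambia sezione, salva la precedente
--         if new_section and new_section != current_section and current_content:
--             sections.append((current_section, '\n\n'.join(current_content)))
--             current_section = new_section
--             current_content = [para]
--         else:
--             current_content.append(para)
--
--     # Aggiungi ultima sezione
--     if current_content:
--         sections.append((current_section, '\n\n'.join(current_content)))
--
--     return sections
-- ===== SOURCE B (Python) =====
-- # Table-driven re-implementation: classify each paragraph by a keyword rule table,
-- # assign each paragraph its final section name in one scan, then group adjacent
-- # runs of equal names into sections.
--
-- _RULES = [
--     ("Practice Structure", ['we are going to work', "let's understand", 'the structure of']),
--     ("Daily Code", ['the code of the day', 'code of today']),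
--     ("Daily Practice Elements", ['mantra', 'statement', 'vibration of the day']),
--     ("Guided Meditation", ['meditation', 'close my eyes', 'breathe', 'visualize']),
--     ("Energy Work", ['chakra', 'portal', 'crown', 'root']),
--     ("Q&A", ['question', 'q&a', 'ask']),
-- ]
--
--
-- def _classify(para):
--     pl = para.lower()
--     for name, keywords in _RULES:
--         if any(k in pl for k in keywords):
--             return name
--     return None
--
--
-- def detect_sections(content: str):
--     paragraphs = [p.strip() for p in content.split('\n\n') if p.strip()]
--     if not paragraphs:
--         return []
--     # final section name per paragraph; the first paragraph always opens "Introduction"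
--     pairs = [("Introduction", paragraphs[0])]
--     for p in paragraphs[1:]:
--         pairs.append((_classify(p) or pairs[-1][0], p))
--     # group adjacent runs of equal names
--     sections = []
--     i = 0
--     while i < len(pairs):
--         n = pairs[i][0]
--         j = i + 1
--         while j < len(pairs) and pairs[j][0] == n:
--             j += 1
--         sections.append((n, '\n\n'.join(p for _, p in pairs[i:j])))
--         i = j
--     return sections
-- ===== Notes on version B (the rewrite author's own statement) =====
-- stated objective: alternative
-- what changed: Replaces the monolithic flush-on-change state machine (if/elif chain interleaved with section buffering) by a keyword rule table with a first-match classifier, a scan assigning each paragraph its final section name, and a separate pass grouping adjacent equal names into sections.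
import Mathlib
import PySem

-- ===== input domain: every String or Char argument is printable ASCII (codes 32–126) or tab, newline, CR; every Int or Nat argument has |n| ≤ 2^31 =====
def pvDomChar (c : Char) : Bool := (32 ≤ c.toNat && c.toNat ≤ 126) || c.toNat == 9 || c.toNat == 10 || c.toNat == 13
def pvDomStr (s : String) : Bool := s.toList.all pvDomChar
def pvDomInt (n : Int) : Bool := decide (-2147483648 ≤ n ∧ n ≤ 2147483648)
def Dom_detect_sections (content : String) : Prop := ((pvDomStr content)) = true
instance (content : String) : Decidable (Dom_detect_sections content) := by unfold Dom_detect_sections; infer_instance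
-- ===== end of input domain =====

-- B replaces A's flush-on-change state machine by a rule-table classifier, a name-assignment scan
-- and a separate adjacent-run grouping pass (objective: alternative; same cost).

-- ===== PORT A =====
def pvClassifyA (para : String) : Option String :=
  let para_lower := PySem.Str.lower para
  let new_section : Option String := none
  if ["we are going to work", "let's understand", "the structure of"].any
      (fun k => PySem.Str.isIn k para_lower) then some "Practice Structure"
  else if ["the code of the day", "code of today"].any
      (fun k => PySem.Str.isIn k para_lower) then some "Daily Code"
  else if ["mantra", "statement", "vibration of the day"].any
      (fun k => PySem.Str.isIn k para_lower) then some "Daily Practice Elements"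
  else if ["meditation", "close my eyes", "breathe", "visualize"].any
      (fun k => PySem.Str.isIn k para_lower) then some "Guided Meditation"
  else if ["chakra", "portal", "crown", "root"].any
      (fun k => PySem.Str.isIn k para_lower) then
    (if new_section ≠ some "Guided Meditation" then some "Energy Work" else new_section)
  else if ["question", "q&a", "ask"].any
      (fun k => PySem.Str.isIn k para_lower) then some "Q&A"
  else new_section

-- A's for-loop over paragraphs, state = (sections, current_section, current_content)
def pvLoopA : List String → List (String × String) → String → List String → List (String × String)
  | [], sections, current_section, current_content =>
    if current_content ≠ [] then
      sections ++ [(current_section, PySem.Str.join "\n\n" current_content)]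
    else sections
  | para :: ps, sections, current_section, current_content =>
    let new_section := pvClassifyA para
    match new_section with
    | some ns =>
      if ns ≠ current_section ∧ current_content ≠ [] then
        pvLoopA ps (sections ++ [(current_section, PySem.Str.join "\n\n" current_content)]) ns [para]
      else
        pvLoopA ps sections current_section (current_content ++ [para])
    | none => pvLoopA ps sections current_section (current_content ++ [para])

def detect_sections (content : String) : List (String × String) :=
  let paragraphs := (((PySem.Str.split? content "\n\n").getD []).map PySem.Str.strip).filter (fun p => p ≠ "")
  pvLoopA paragraphs [] "Introduction" []

-- ===== PORT B =====
def pvRules : List (String × List String) :=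
  [("Practice Structure", ["we are going to work", "let's understand", "the structure of"]),
   ("Daily Code", ["the code of the day", "code of today"]),
   ("Daily Practice Elements", ["mantra", "statement", "vibration of the day"]),
   ("Guided Meditation", ["meditation", "close my eyes", "breathe", "visualize"]),
   ("Energy Work", ["chakra", "portal", "crown", "root"]),
   ("Q&A", ["question", "q&a", "ask"])]

def pvFindRule (pl : String) : List (String × List String) → Option String
  | [] => none
  | (name, keywords) :: rest =>
    if keywords.any (fun k => PySem.Str.isIn k pl) then some name else pvFindRule pl rest

def pvClassifyB (para : String) : Option String :=
  pvFindRule (PySem.Str.lower para) pvRules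

-- scan: each paragraph gets its final section name ((_classify(p) or pairs[-1][0]), prev carried)
def pvScanB (prev : String) : List String → List (String × String)
  | [] => []
  | p :: ps =>
    let n := (pvClassifyB p).getD prev
    (n, p) :: pvScanB n ps

-- group adjacent runs of equal names (B's while-loop consuming one run per step)
def pvGroupB : List (String × String) → List (String × String)
  | [] => []
  | (n, p) :: rest =>
    let run := rest.takeWhile (fun q => q.1 == n)
    (n, PySem.Str.join "\n\n" (p :: run.map (fun q => q.2)))
      :: pvGroupB (rest.dropWhile (fun q => q.1 == n))
termination_by pairs => pairs.length
decreasing_by simpa using Nat.lt_succ_of_le (List.length_dropWhile_le _ _)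

def detect_sections_alt (content : String) : List (String × String) :=
  let paragraphs := (((PySem.Str.split? content "\n\n").getD []).map PySem.Str.strip).filter (fun p => p ≠ "")
  match paragraphs with
  | [] => []
  | p0 :: ps => pvGroupB (("Introduction", p0) :: pvScanB "Introduction" ps)

-- ===== PRECONDITION & SPEC =====
def Spec_detect_sections (content : String) (out : List (String × String)) : Prop := out = detect_sections_alt content
instance (content : String) (out : List (String × String)) : Decidable (Spec_detect_sections content out) := by unfold Spec_detect_sections; infer_instance

-- ===== CLAIM (what is proved, stated in full; the proofs are below) =====
def Claim_equal_detect_sections : Prop := ∀ (content : String), Dom_detect_sections content → Spec_detect_sections content (detect_sections content)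

-- ===== LEMMAS AND PROOFS =====

-- the two classifiers agree
theorem pvClassify_eq (p : String) : pvClassifyA p = pvClassifyB p := by
  simp only [pvClassifyA, pvClassifyB, pvRules, pvFindRule]
  split_ifs <;> simp_all

-- main invariant: with a non-empty buffer, A's loop produces the buffered section merged with
-- the leading run of the scan, then the grouped remainder
theorem pvLoopA_eq_group (ps : List String) :
    ∀ (secs : List (String × String)) (cur : String) (buf : List String), buf ≠ [] →
    pvLoopA ps secs cur buf =
      secs ++ ((cur, PySem.Str.join "\n\n"
            (buf ++ ((pvScanB cur ps).takeWhile (fun q => q.1 == cur)).map (fun q => q.2)))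
        :: pvGroupB ((pvScanB cur ps).dropWhile (fun q => q.1 == cur))) := by
  induction ps with
  | nil => intro secs cur buf hb; simp [pvLoopA, hb, pvScanB, pvGroupB]
  | cons p ps ih =>
    intro secs cur buf hb
    simp only [pvLoopA, pvScanB, pvClassify_eq]
    cases hc : pvClassifyB p with
    | none =>
      simp only [Option.getD_none]
      rw [ih secs cur (buf ++ [p]) (by simp)]
      simp [List.takeWhile, List.dropWhile]
    | some n =>
      by_cases hn : n = cur
      · subst hn
        simp only [ne_eq, not_true_eq_false, false_and, if_false, Option.getD_some]
        rw [ih secs n (buf ++ [p]) (by simp)]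
        simp [List.takeWhile, List.dropWhile]
      · simp only [ne_eq, hn, not_false_eq_true, hb, true_and, if_true, Option.getD_some]
        rw [ih _ n [p] (by simp)]
        have hne : (n == cur) = false := by simp [hn]
        simp [List.takeWhile, List.dropWhile, hne, pvGroupB]

-- ===== VERDICT (by name: the statement is the Claim_ definition above) =====
theorem detect_sections_spec : Claim_equal_detect_sections := by
  intro content _
  unfold Spec_detect_sections detect_sections detect_sections_alt
  cases hps : (((PySem.Str.split? content "\n\n").getD []).map PySem.Str.strip).filter (fun p => p ≠ "") with
  | nil => simp [pvLoopA]
  | cons p0 ps =>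
    simp only [pvLoopA, pvClassify_eq]
    have h0 : pvLoopA ps [] "Introduction" [p0] =
        [] ++ (("Introduction", PySem.Str.join "\n\n"
              ([p0] ++ ((pvScanB "Introduction" ps).takeWhile (fun q => q.1 == "Introduction")).map (fun q => q.2)))
          :: pvGroupB ((pvScanB "Introduction" ps).dropWhile (fun q => q.1 == "Introduction"))) :=
      pvLoopA_eq_group ps [] "Introduction" [p0] (by simp)
    cases hc : pvClassifyB p0 with
    | none => simpa [pvGroupB] using h0
    | some n =>
      -- buffer is empty on the first iteration, so the else-branch runs in every case
      simp only [ne_eq, List.nil_append]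
      simpa [pvGroupB] using h0
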